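-- pv_equiv track=rewrite | github.com/GihunKwon/LeetCode | 2243-calculate-digit-sum-of-a-string/2243-calculate-digit-sum-of-a-string.py | digitSum
-- ===== SOURCE A (Python) =====
-- def digitSum(s: str, k: int) -> str:
--     while len(s) > k:
--         answer = ''
--         for i in range(0,len(s),k):
--             total = 0
--             num = s[i:i+k]
--             for j in num:
--                 total += int(j)
--             answer += str(total)
--         s = answer
--     return s
-- ===== SOURCE B (Python) =====
-- def digitSum(s: str, k: int) -> str:
--     # Tail recursion on one compression pass; the pass is a single
--     # char-by-char accumulator (no index arithmetic, no slicing).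
--     if len(s) <= k:
--         return s
--     groups = []
--     total = 0
--     cnt = 0
--     for ch in s:
--         total += int(ch)
--         cnt += 1
--         if cnt == k:
--             groups.append(str(total))
--             total = 0
--             cnt = 0
--     if cnt > 0:
--         groups.append(str(total))
--     return digitSum(''.join(groups), k)
-- ===== Notes on version B (the rewrite author's own statement) =====
-- stated objective: alternative
-- what changed: The while-loop over index-sliced chunks (for i in range(0,len(s),k) with s[i:i+k] and an inner digit loop) becomes tail recursion whose single char-by-char pass keeps a (total,count) accumulator, emits one group sum at each k-boundary, and joins the groups once instead of repeated string concatenation.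
import Mathlib
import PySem

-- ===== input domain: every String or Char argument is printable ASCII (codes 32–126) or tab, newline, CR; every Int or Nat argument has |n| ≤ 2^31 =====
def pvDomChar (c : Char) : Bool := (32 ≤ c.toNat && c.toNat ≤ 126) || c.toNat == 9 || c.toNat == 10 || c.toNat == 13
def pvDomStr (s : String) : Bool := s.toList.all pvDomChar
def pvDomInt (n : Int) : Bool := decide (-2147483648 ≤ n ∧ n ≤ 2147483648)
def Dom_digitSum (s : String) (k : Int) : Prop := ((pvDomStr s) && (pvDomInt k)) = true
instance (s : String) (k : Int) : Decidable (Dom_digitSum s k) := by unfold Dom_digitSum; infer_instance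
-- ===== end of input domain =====

-- B replaces A's index-sliced chunk loop by tail recursion over a single char-by-char
-- accumulator pass (alternative decomposition, same cost).


-- ===== PORT A =====
-- int(j) on a one-character string; `.getD 0` only totalizes where Python raises ValueError (excluded by Pre_)
def pvCharInt (c : Char) : Int := (PySem.Int.ofChars? [c]).getD 0

-- one iteration of A's while-body: for i in range(0,len(s),k): total = sum of int over s[i:i+k]; answer += str(total)
def pvPassA (cs : List Char) (k : Int) : List Char :=
  (PySem.List.pyRange 0 (cs.length : Int) k).foldl
    (fun answer i =>
      let num := PySem.List.slice cs (some i) (some (i + k))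
      let total := num.foldl (fun t j => t + pvCharInt j) 0
      answer ++ PySem.Int.toChars total) []

-- fuel bounding the number of while-loop passes; on Pre_ inputs digit-sum + length strictly
-- shrinks each pass, so this fuel is never exhausted there (the guard only totalizes the loop)
def pvFuel (cs : List Char) : Nat := 10 * cs.length + 16

def pvLoopA : Nat → List Char → Int → List Char
  | 0, cs, _ => cs
  | fuel + 1, cs, k => if (cs.length : Int) > k then pvLoopA fuel (pvPassA cs k) k else cs

def digitSum (s : String) (k : Int) : String := String.ofList (pvLoopA (pvFuel s.toList) s.toList k)

-- ===== PORT B =====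
-- loop body of B's single pass: total += int(ch); cnt += 1; flush the group when cnt == k
def pvStepB (k : Int) (st : List (List Char) × Int × Int) (c : Char) :
    List (List Char) × Int × Int :=
  let total := st.2.1 + pvCharInt c
  let cnt := st.2.2 + 1
  if cnt == k then (st.1 ++ [PySem.Int.toChars total], 0, 0) else (st.1, total, cnt)

-- one compression pass: char-by-char accumulator, final partial-group flush, ''.join(groups)
def pvPassB (cs : List Char) (k : Int) : List Char :=
  let st := cs.foldl (pvStepB k) ([], 0, 0)
  (if st.2.2 > 0 then st.1 ++ [PySem.Int.toChars st.2.1] else st.1).flatten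

-- tail recursion of Source B, made total with the same fuel as A's loop
def pvLoopB : Nat → List Char → Int → List Char
  | 0, cs, _ => cs
  | fuel + 1, cs, k => if (cs.length : Int) ≤ k then cs else pvLoopB fuel (pvPassB cs k) k

def digitSum_alt (s : String) (k : Int) : String := String.ofList (pvLoopB (pvFuel s.toList) s.toList k)

-- ===== PRECONDITION & SPEC =====
-- Pre_: exactly where Python A returns: either the loop never runs (len(s) <= k), or k >= 2 and
-- every character is a digit (otherwise int(j) raises ValueError; and with len(s) > k, k = 0
-- raises on range's zero step while k = 1 or k < 0 never terminates).
def Pre_digitSum (s : String) (k : Int) : Prop :=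
  (s.toList.length : Int) ≤ k ∨ (2 ≤ k ∧ ∀ c ∈ s.toList, c.isDigit = true)
instance (s : String) (k : Int) : Decidable (Pre_digitSum s k) := by
  unfold Pre_digitSum; infer_instance
def pvWitness_digitSum : String × Int := ("12", 2)

def Spec_digitSum (s : String) (k : Int) (out : String) : Prop := out = digitSum_alt s k
instance (s : String) (k : Int) (out : String) : Decidable (Spec_digitSum s k out) := by
  unfold Spec_digitSum; infer_instance

-- ===== CLAIM (what is proved, stated in full; the proofs are below) =====
def Claim_equal_digitSum : Prop :=
  ∀ (s : String) (k : Int), Dom_digitSum s k → Pre_digitSum s k → Spec_digitSum s k (digitSum s k)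

-- ===== LEMMAS AND PROOFS =====

-- the k-sized chunks of the character list (the common spec both passes are proved equal to)
def pvChunks : List Char → Nat → List (List Char)
  | [], _ => []
  | c :: rest, k => ((c :: rest).take k) :: pvChunks (rest.drop (k - 1)) k
termination_by cs _ => cs.length
decreasing_by exact Nat.lt_succ_of_le (by simp)

-- what one pass contributes for one chunk: str(sum of its digits)
def pvG (chunk : List Char) : List Char :=
  PySem.Int.toChars ((chunk.map pvCharInt).sum)

theorem pvChunks_cons (cs : List Char) (k : Nat) (hcs : cs ≠ []) (hk : 1 ≤ k) :
    pvChunks cs k = cs.take k :: pvChunks (cs.drop k) k := by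
  match cs with
  | [] => exact absurd rfl hcs
  | c :: rest =>
    have hd : (c :: rest).drop k = rest.drop (k - 1) := by
      obtain ⟨k', rfl⟩ : ∃ k', k = k' + 1 := ⟨k - 1, by omega⟩
      simp
    rw [hd]; simp only [pvChunks]

theorem pvPyRange_pos_cons (a b s : Int) (hs : 0 < s) (hab : a < b) :
    PySem.List.pyRange a b s = a :: PySem.List.pyRange (a + s) b s := by
  rw [PySem.List.pyRange_of_pos _ _ hs, PySem.List.pyRange_of_pos _ _ hs]
  have h1 : (b - a + s - 1) / s = (b - a - 1) / s + 1 := by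
    have h := Int.add_mul_ediv_right (b - a - 1) 1 (show s ≠ 0 by omega)
    rw [one_mul] at h
    rw [show b - a + s - 1 = b - a - 1 + s by ring, h]
  have h2 : 0 ≤ (b - a - 1) / s := Int.ediv_nonneg (by omega) (by omega)
  rw [if_pos hab, h1, show ((b - a - 1) / s + 1).toNat = ((b - a - 1) / s).toNat + 1 by omega,
    List.range_succ_eq_map]
  by_cases hc : a + s < b
  · rw [if_pos hc, show b - (a + s) + s - 1 = b - a - 1 by ring]
    simp only [List.map_cons, List.map_map, Nat.cast_zero, mul_zero, add_zero]
    refine List.cons_eq_cons.mpr ⟨rfl, ?_⟩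
    apply List.map_congr_left
    intro j _
    simp only [Function.comp]
    push_cast
    ring
  · rw [if_neg hc]
    have h0 : (b - a - 1) / s = 0 := Int.ediv_eq_zero_of_lt (by omega) (by omega)
    rw [h0]
    simp

theorem pvPyRange_shift (a b s : Int) (hs : 0 < s) :
    PySem.List.pyRange (a + s) b s = (PySem.List.pyRange a (b - s) s).map (· + s) := by
  rw [PySem.List.pyRange_of_pos _ _ hs, PySem.List.pyRange_of_pos _ _ hs, List.map_map]
  by_cases hc : a + s < b
  · rw [if_pos hc, if_pos (by omega : a < b - s),
      show b - s - a + s - 1 = b - (a + s) + s - 1 by ring]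
    apply List.map_congr_left
    intro j _
    simp only [Function.comp]
    ring
  · rw [if_neg hc, if_neg (by omega : ¬ a < b - s)]
    simp

theorem pvSlices_eq (κ : Nat) (hκ : 1 ≤ κ) :
    ∀ (n : Nat) (cs : List Char), cs.length ≤ n →
      (PySem.List.pyRange 0 (cs.length : Int) (κ : Int)).map
          (fun i => PySem.List.slice cs (some i) (some (i + (κ : Int)))) =
        pvChunks cs κ := by
  have hκI : (0 : Int) < (κ : Int) := by exact_mod_cast hκ
  intro n
  induction n with
  | zero =>
    intro cs hlen
    have : cs = [] := List.length_eq_zero_iff.mp (by omega)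
    subst this
    simp [pvChunks, PySem.List.pyRange_of_pos _ _ hκI]
  | succ n ih =>
    intro cs hlen
    by_cases hne : cs = []
    · subst hne
      simp [pvChunks, PySem.List.pyRange_of_pos _ _ hκI]
    · have hpos : 0 < cs.length := List.length_pos_iff.mpr hne
      rw [pvPyRange_pos_cons 0 _ _ hκI (by exact_mod_cast hpos),
        pvPyRange_shift 0 _ _ hκI, pvChunks_cons cs κ hne hκ]
      simp only [List.map_cons, List.map_map]
      refine List.cons_eq_cons.mpr ⟨?_, ?_⟩
      · rw [zero_add, PySem.List.slice_zero_start, PySem.List.slice_to _ (le_of_lt hκI)]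
        simp
      · by_cases hκlen : κ ≤ cs.length
        · have hend : ((cs.drop κ).length : Int) = (cs.length : Int) - (κ : Int) := by
            simp; omega
          have ihd := ih (cs.drop κ) (by simp; omega)
          rw [hend] at ihd
          rw [← ihd]
          apply List.map_congr_left
          intro i hi
          have h0i : 0 ≤ i := by
            have := (PySem.List.mem_pyRange_iff_of_pos hκI i).mp hi
            omega
          simp only [Function.comp]
          rw [PySem.List.slice_toNat _ (by omega) (by omega),
            PySem.List.slice_toNat _ (by omega) (by omega), List.drop_drop]
          rw [show (i + (κ : Int)).toNat = κ + i.toNat by omega,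
            show (i + (κ : Int) + κ).toNat - (κ + i.toNat) = (κ + i.toNat) - i.toNat by omega]
        · have hd : cs.drop κ = [] := List.drop_eq_nil_iff.mpr (by omega)
          rw [hd]
          have : PySem.List.pyRange 0 ((cs.length : Int) - (κ : Int)) (κ : Int) = [] := by
            rw [PySem.List.pyRange_of_pos _ _ hκI, if_neg (by omega)]
            simp
          rw [this]
          simp [pvChunks]

theorem pvPassA_eq (κ : Nat) (hκ : 1 ≤ κ) (cs : List Char) :
    pvPassA cs (κ : Int) = ((pvChunks cs κ).map pvG).flatten := by
  unfold pvPassA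
  rw [PySem.List.foldl_append_eq_flatMap
      (fun i => PySem.Int.toChars
        ((PySem.List.slice cs (some i) (some (i + (κ : Int)))).foldl
          (fun t j => t + pvCharInt j) 0)),
    List.nil_append, List.flatMap_def, ← pvSlices_eq κ hκ cs.length cs le_rfl, List.map_map]
  congr 1
  apply List.map_congr_left
  intro i _
  simp only [Function.comp, pvG]
  rw [PySem.List.foldl_add _ pvCharInt 0, zero_add]

theorem pvB_partial (κ : Nat) :
    ∀ (c : List Char) (groups : List (List Char)) (total cnt : Int),
      cnt + (c.length : Int) < (κ : Int) →
      c.foldl (pvStepB (κ : Int)) (groups, total, cnt) =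
        (groups, total + (c.map pvCharInt).sum, cnt + (c.length : Int)) := by
  intro c
  induction c with
  | nil => intro groups total cnt _; simp
  | cons x t ih =>
    intro groups total cnt h
    have hne : (cnt + 1 == (κ : Int)) = false := by
      rw [beq_eq_false_iff_ne]
      simp only [List.length_cons] at h
      push_cast at h
      omega
    simp only [List.foldl_cons, pvStepB, hne, Bool.false_eq_true, if_false]
    rw [ih _ _ _ (by simp only [List.length_cons] at h; push_cast at h ⊢; omega)]
    simp only [List.map_cons, List.sum_cons, List.length_cons]
    push_cast
    refine Prod.ext rfl (Prod.ext ?_ ?_) <;> simp <;> ring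

theorem pvB_chunk (κ : Nat) :
    ∀ (c : List Char) (rest : List Char) (groups : List (List Char)) (total cnt : Int),
      cnt + (c.length : Int) = (κ : Int) → cnt < (κ : Int) →
      (c ++ rest).foldl (pvStepB (κ : Int)) (groups, total, cnt) =
        rest.foldl (pvStepB (κ : Int))
          (groups ++ [PySem.Int.toChars (total + (c.map pvCharInt).sum)], 0, 0) := by
  intro c
  induction c with
  | nil => intro rest groups total cnt h hlt; simp at h; omega
  | cons x t ih =>
    intro rest groups total cnt h hlt
    by_cases ht : t = []
    · subst ht
      have hk : (cnt + 1 == (κ : Int)) = true := by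
        rw [beq_iff_eq]; simp at h; omega
      simp [pvStepB, hk]
    · have hne : (cnt + 1 == (κ : Int)) = false := by
        rw [beq_eq_false_iff_ne]
        have : 1 ≤ t.length := List.length_pos_iff.mpr ht
        simp only [List.length_cons] at h
        push_cast at h
        omega
      simp only [List.cons_append, List.foldl_cons, pvStepB, hne, Bool.false_eq_true, if_false]
      rw [ih rest groups (total + pvCharInt x) (cnt + 1)
        (by simp only [List.length_cons] at h; push_cast at h ⊢; omega) (by
          have : 1 ≤ t.length := List.length_pos_iff.mpr ht
          simp only [List.length_cons] at h; push_cast at h; omega)]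
      simp only [List.map_cons, List.sum_cons]
      ring_nf

theorem pvB_main (κ : Nat) (hκ : 1 ≤ κ) :
    ∀ (n : Nat) (cs : List Char) (groups : List (List Char)), cs.length ≤ n →
      (if (cs.foldl (pvStepB (κ : Int)) (groups, 0, 0)).2.2 > 0 then
          (cs.foldl (pvStepB (κ : Int)) (groups, 0, 0)).1 ++
            [PySem.Int.toChars (cs.foldl (pvStepB (κ : Int)) (groups, 0, 0)).2.1]
        else (cs.foldl (pvStepB (κ : Int)) (groups, 0, 0)).1) =
        groups ++ (pvChunks cs κ).map pvG := by
  intro n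
  induction n with
  | zero =>
    intro cs groups hlen
    have : cs = [] := List.length_eq_zero_iff.mp (by omega)
    subst this
    simp [pvChunks]
  | succ n ih =>
    intro cs groups hlen
    by_cases hne : cs = []
    · subst hne; simp [pvChunks]
    · have hpos : 0 < cs.length := List.length_pos_iff.mpr hne
      by_cases hlt : cs.length < κ
      · rw [pvB_partial κ cs groups 0 0 (by exact_mod_cast by omega)]
        simp only [zero_add]
        rw [if_pos (by exact_mod_cast hpos)]
        have hch : pvChunks cs κ = [cs] := by
          rw [pvChunks_cons cs κ hne hκ, List.take_of_length_le (by omega),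
            List.drop_eq_nil_iff.mpr (by omega)]
          simp [pvChunks]
        rw [hch]
        simp [pvG]
      · have hsplit := List.take_append_drop κ cs
        conv_lhs => rw [← hsplit]
        rw [pvB_chunk κ (cs.take κ) (cs.drop κ) groups 0 0
          (by simp; omega) (by exact_mod_cast hκ)]
        rw [ih (cs.drop κ) _ (by simp; omega)]
        rw [pvChunks_cons cs κ hne hκ]
        simp [pvG]

theorem pvPassB_eq (κ : Nat) (hκ : 1 ≤ κ) (cs : List Char) :
    pvPassB cs (κ : Int) = ((pvChunks cs κ).map pvG).flatten := by
  have h := pvB_main κ hκ cs.length cs [] le_rfl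
  rw [List.nil_append] at h
  show (if (cs.foldl (pvStepB (κ : Int)) ([], 0, 0)).2.2 > 0 then
      (cs.foldl (pvStepB (κ : Int)) ([], 0, 0)).1 ++
        [PySem.Int.toChars (cs.foldl (pvStepB (κ : Int)) ([], 0, 0)).2.1]
    else (cs.foldl (pvStepB (κ : Int)) ([], 0, 0)).1).flatten =
    ((pvChunks cs κ).map pvG).flatten
  rw [h]

theorem pvPass_eq (cs : List Char) (k : Int) (hk : 1 ≤ k) :
    pvPassA cs k = pvPassB cs k := by
  obtain ⟨κ, rfl⟩ : ∃ κ : Nat, k = (κ : Int) := ⟨k.toNat, by omega⟩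
  have hκ : 1 ≤ κ := by exact_mod_cast hk
  rw [pvPassA_eq κ hκ, pvPassB_eq κ hκ]

theorem pvLoops_eq (fuel : Nat) :
    ∀ (cs : List Char) (k : Int), 1 ≤ k ∨ (cs.length : Int) ≤ k →
      pvLoopA fuel cs k = pvLoopB fuel cs k := by
  induction fuel with
  | zero => intro cs k _; rfl
  | succ fuel ih =>
    intro cs k h
    by_cases hgt : (cs.length : Int) > k
    · have hk : 1 ≤ k := h.resolve_right (by omega)
      simp only [pvLoopA, pvLoopB, if_pos hgt, if_neg (by omega : ¬ (cs.length : Int) ≤ k)]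
      rw [pvPass_eq cs k hk]
      exact ih _ k (Or.inl hk)
    · simp only [pvLoopA, pvLoopB, if_neg hgt, if_pos (by omega : (cs.length : Int) ≤ k)]

-- ===== VERDICT (by name: the statement is the Claim_ definition above) =====
theorem digitSum_spec : Claim_equal_digitSum := by
  intro s k _ hpre
  show digitSum s k = digitSum_alt s k
  unfold digitSum digitSum_alt
  rcases hpre with h | h
  · exact congrArg _ (pvLoops_eq _ _ _ (Or.inr h))
  · exact congrArg _ (pvLoops_eq _ _ _ (Or.inl (by omega)))
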